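-- pv_equiv track=rewrite | github.com/boring180/ChinesePokerAi | game_control.py | is_straight_pairs
-- ===== SOURCE A (Python) =====
-- from typing import List, Optional, Tuple
--
-- def is_straight_pairs(values: List[int]) -> bool:
--     """Check if values form valid consecutive pairs (3+ pairs)"""
--     if len(values) < 6 or len(values) % 2 != 0:
--         return False
--     if values[-1] >= 12:  # Ends with 2 - invalid
--         return False
--     # Check pairs
--     for i in range(0, len(values), 2):
--         if values[i] != values[i + 1]:
--             return False
--     # Check consecutive
--     pair_values = [values[i] for i in range(0, len(values), 2)]
--     return all(pair_values[i] + 1 == pair_values[i + 1] for i in range(len(pair_values) - 1))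
-- ===== SOURCE B (Python) =====
-- from typing import List
--
--
-- def is_straight_pairs(values: List[int]) -> bool:
--     """Check if values form valid consecutive pairs (3+ pairs)"""
--     if len(values) < 6 or len(values) % 2 != 0:
--         return False
--     if values[-1] >= 12:  # Ends with 2 - invalid
--         return False
--     expected = [values[0] + i // 2 for i in range(len(values))]
--     return values == expected
-- ===== Notes on version B (the rewrite author's own statement) =====
-- stated objective: simpler
-- what changed: Replaces A's two separate scans (a pair-equality loop plus a consecutive check over an extracted pair_values list) with one build-and-compare: reconstruct the unique canonical sequence (first value + i//2 at each position i) and test list equality.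
import Mathlib
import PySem

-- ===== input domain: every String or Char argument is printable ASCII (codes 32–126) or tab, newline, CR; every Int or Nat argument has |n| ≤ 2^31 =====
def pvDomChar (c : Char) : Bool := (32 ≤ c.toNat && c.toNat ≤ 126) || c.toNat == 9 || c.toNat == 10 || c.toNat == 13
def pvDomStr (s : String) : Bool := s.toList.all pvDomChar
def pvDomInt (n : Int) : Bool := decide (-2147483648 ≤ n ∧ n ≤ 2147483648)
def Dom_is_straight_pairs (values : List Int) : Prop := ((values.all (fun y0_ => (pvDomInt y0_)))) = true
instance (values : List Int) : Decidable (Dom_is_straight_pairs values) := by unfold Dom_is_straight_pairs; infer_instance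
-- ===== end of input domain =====

-- B folds A's two scans (pair equality, then consecutiveness of the extracted pair values) into a
-- single build-and-compare against the reconstructed canonical sequence (first value + i//2) (simpler).

-- ===== PORT A =====
def is_straight_pairs (values : List Int) : Bool :=
  -- if len(values) < 6 or len(values) % 2 != 0: return False
  if values.length < 6 ∨ values.length % 2 ≠ 0 then false
  -- if values[-1] >= 12: return False
  else if 12 ≤ PySem.List.pyGetD values (-1) 0 then false
  -- for i in range(0, len(values), 2): if values[i] != values[i+1]: return False
  else if !((PySem.List.pyRange 0 (values.length : Int) 2).all (fun i =>
      PySem.List.pyGetD values i 0 == PySem.List.pyGetD values (i + 1) 0)) then false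
  else
    -- pair_values = [values[i] for i in range(0, len(values), 2)]
    let pair_values := (PySem.List.pyRange 0 (values.length : Int) 2).map
      (fun i => PySem.List.pyGetD values i 0)
    -- all(pair_values[i] + 1 == pair_values[i+1] for i in range(len(pair_values) - 1))
    (PySem.List.pyRange 0 ((pair_values.length : Int) - 1) 1).all (fun i =>
      PySem.List.pyGetD pair_values i 0 + 1 == PySem.List.pyGetD pair_values (i + 1) 0)

-- ===== PORT B =====
def is_straight_pairs_alt (values : List Int) : Bool :=
  if values.length < 6 ∨ values.length % 2 ≠ 0 then false
  else if 12 ≤ PySem.List.pyGetD values (-1) 0 then false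
  else
    -- expected = [values[0] + i // 2 for i in range(len(values))]
    let expected := (PySem.List.pyRange 0 (values.length : Int) 1).map
      (fun i => PySem.List.pyGetD values 0 0 + PySem.Int.floordiv i 2)
    values == expected

-- ===== PRECONDITION & SPEC =====
def Spec_is_straight_pairs (values : List Int) (out : Bool) : Prop := out = is_straight_pairs_alt values
instance (values : List Int) (out : Bool) : Decidable (Spec_is_straight_pairs values out) := by unfold Spec_is_straight_pairs; infer_instance

-- ===== CLAIM (what is proved, stated in full; the proofs are below) =====
def Claim_equal_is_straight_pairs : Prop := ∀ (values : List Int), Dom_is_straight_pairs values → Spec_is_straight_pairs values (is_straight_pairs values)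

-- ===== LEMMAS AND PROOFS =====

-- range(0, n, 2) for positive n is the evens below n
theorem pvRange2_eq (n : Nat) (h0 : 0 < n) :
    PySem.List.pyRange 0 (n : Int) 2 = (List.range ((n+1)/2)).map (fun k => ((2*k : Nat) : Int)) := by
  rw [PySem.List.pyRange_of_pos 0 (n:Int) (by norm_num)]
  rw [if_pos (by exact_mod_cast h0)]
  have h : (((n:Int) - 0 + 2 - 1) / 2).toNat = (n+1)/2 := by omega
  rw [h]
  apply List.map_congr_left
  intro k _
  push_cast
  ring

-- arithmetic core: pair equality + consecutiveness ↔ pointwise canonical form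
theorem pvCore (g : Nat → Int) (m : Nat) (hm : 1 ≤ m) :
    ((∀ k, k < m → g (2*k) = g (2*k+1)) ∧ (∀ k, k < m - 1 → g (2*k) + 1 = g (2*k+2))) ↔
    (∀ k, k < 2*m → g k = g 0 + ((k/2 : Nat) : Int)) := by
  constructor
  · rintro ⟨hp, hc⟩
    have heven : ∀ j, j < m → g (2*j) = g 0 + (j : Int) := by
      intro j hj
      induction j with
      | zero => simp
      | succ i ih =>
        have h1 : g (2*i) + 1 = g (2*i+2) := hc i (by omega)
        have h2 : g (2*i) = g 0 + (i : Int) := ih (by omega)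
        rw [show 2*(i+1) = 2*i+2 by ring, ← h1, h2]
        push_cast
        ring
    intro k hk
    rcases Nat.even_or_odd k with ⟨j, hj⟩ | ⟨j, hj⟩
    · have hjm : j < m := by omega
      rw [show k / 2 = j by omega, show k = 2*j by omega]
      exact heven j hjm
    · have hjm : j < m := by omega
      rw [show k / 2 = j by omega, show k = 2*j+1 by omega, ← hp j hjm]
      exact heven j hjm
  · intro h
    refine ⟨fun k hk => ?_, fun k hk => ?_⟩
    · rw [h (2*k) (by omega), h (2*k+1) (by omega),
        show (2*k) / 2 = k by omega, show (2*k+1) / 2 = k by omega]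
    · rw [h (2*k) (by omega), h (2*k+2) (by omega),
        show (2*k) / 2 = k by omega, show (2*k+2) / 2 = k + 1 by omega]
      push_cast
      ring

theorem pvIfBool (a c : Bool) : (if (!a) = true then false else c) = (a && c) := by
  cases a <;> simp

theorem pvMain (values : List Int) : is_straight_pairs values = is_straight_pairs_alt values := by
  unfold is_straight_pairs is_straight_pairs_alt
  by_cases h1 : values.length < 6 ∨ values.length % 2 ≠ 0
  · rw [if_pos h1, if_pos h1]
  · by_cases h2 : 12 ≤ PySem.List.pyGetD values (-1) 0
    · rw [if_neg h1, if_neg h1, if_pos h2, if_pos h2]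
    · rw [if_neg h1, if_neg h1, if_neg h2, if_neg h2]
      have hn6 : 6 ≤ values.length := by omega
      have hev : values.length % 2 = 0 := by omega
      obtain ⟨m, hn2m⟩ : ∃ m, values.length = 2*m := ⟨values.length/2, by omega⟩
      have hm3 : 3 ≤ m := by omega
      -- range(0, n, 2) is the evens below n
      have hr2 : PySem.List.pyRange 0 (values.length : Int) 2 =
          (List.range m).map (fun k => ((2*k : Nat) : Int)) := by
        rw [pvRange2_eq values.length (by omega),
            show (values.length+1)/2 = m by omega]
      -- A's pair-equality scan
      have hpairs : (((PySem.List.pyRange 0 (values.length : Int) 2).all (fun i =>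
          PySem.List.pyGetD values i 0 == PySem.List.pyGetD values (i + 1) 0)) = true) ↔
          (∀ k, k < m → values.getD (2*k) 0 = values.getD (2*k+1) 0) := by
        rw [hr2, List.all_map, List.all_eq_true]
        have harg : ∀ k : Nat,
            ((fun i => PySem.List.pyGetD values i 0 == PySem.List.pyGetD values (i + 1) 0) ∘
              (fun k : Nat => ((2*k : Nat) : Int))) k =
            (values.getD (2*k) 0 == values.getD (2*k+1) 0) := by
          intro k
          simp only [Function.comp]
          rw [show ((2*k : Nat) : Int) + 1 = ((2*k+1 : Nat) : Int) by push_cast; ring,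
              PySem.List.pyGetD_natCast, PySem.List.pyGetD_natCast]
        constructor
        · intro h k hk
          have := h k (List.mem_range.mpr hk)
          rw [harg k] at this
          exact beq_iff_eq.mp this
        · intro h k hk
          rw [harg k]
          exact beq_iff_eq.mpr (h k (List.mem_range.mp hk))
      -- pair_values
      have hpv : ((PySem.List.pyRange 0 (values.length : Int) 2).map
          (fun i => PySem.List.pyGetD values i 0)) =
          (List.range m).map (fun k => values.getD (2*k) 0) := by
        rw [hr2, List.map_map]
        apply List.map_congr_left
        intro k _
        simp only [Function.comp]
        rw [PySem.List.pyGetD_natCast]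
      -- A's consecutive scan, over the rewritten pair_values
      have hconsec : (((PySem.List.pyRange 0 ((((List.range m).map (fun k => values.getD (2*k) 0)).length : Int) - 1) 1).all (fun i =>
          PySem.List.pyGetD ((List.range m).map (fun k => values.getD (2*k) 0)) i 0 + 1 ==
          PySem.List.pyGetD ((List.range m).map (fun k => values.getD (2*k) 0)) (i + 1) 0)) = true) ↔
          (∀ k, k < m - 1 → values.getD (2*k) 0 + 1 = values.getD (2*k+2) 0) := by
        rw [List.length_map, List.length_range,
            show ((m : Int) - 1) = ((m - 1 : Nat) : Int) by omega,
            PySem.List.pyRange_one,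
            show (((m - 1 : Nat) : Int) - 0).toNat = m - 1 by omega,
            List.all_map, List.all_eq_true]
        have harg : ∀ k : Nat, k < m - 1 →
            ((fun i => PySem.List.pyGetD ((List.range m).map (fun k => values.getD (2*k) 0)) i 0 + 1 ==
              PySem.List.pyGetD ((List.range m).map (fun k => values.getD (2*k) 0)) (i + 1) 0) ∘
              (fun k : Nat => (0 : Int) + (k : Int))) k =
            (values.getD (2*k) 0 + 1 == values.getD (2*(k+1)) 0) := by
          intro k hk
          simp only [Function.comp]
          rw [show ((0 : Int) + (k : Int)) = ((k : Nat) : Int) by ring]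
          rw [show (((k : Nat) : Int) + 1) = ((k+1 : Nat) : Int) by push_cast; ring]
          rw [PySem.List.pyGetD_natCast, PySem.List.pyGetD_natCast,
              PySem.List.getD_map_range _ _ _ _ (by omega),
              PySem.List.getD_map_range _ _ _ _ (by omega)]
        constructor
        · intro h k hk
          have := h k (List.mem_range.mpr hk)
          rw [harg k hk] at this
          have := beq_iff_eq.mp this
          rw [this, show 2*(k+1) = 2*k+2 by ring]
        · intro h k hkmem
          have hk : k < m - 1 := List.mem_range.mp hkmem
          rw [harg k hk]
          exact beq_iff_eq.mpr (by rw [show 2*(k+1) = 2*k+2 by ring]; exact h k hk)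
      -- B's expected list
      have hexp : ((PySem.List.pyRange 0 (values.length : Int) 1).map
          (fun i => PySem.List.pyGetD values 0 0 + PySem.Int.floordiv i 2)) =
          (List.range values.length).map (fun k => values.getD 0 0 + ((k/2 : Nat) : Int)) := by
        rw [PySem.List.pyRange_one,
            show (((values.length : Nat) : Int) - 0).toNat = values.length by omega,
            List.map_map]
        apply List.map_congr_left
        intro k _
        simp only [Function.comp]
        rw [show ((0 : Int) + (k : Int)) = ((k : Nat) : Int) by ring]
        rw [show PySem.Int.floordiv ((k : Nat) : Int) 2 = ((k/2 : Nat) : Int) by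
          simp [PySem.Int.floordiv, Int.fdiv_eq_ediv_of_nonneg]]
        rw [PySem.List.pyGetD_zero]
      -- B's comparison
      have hB : ((values == (List.range values.length).map
          (fun k => values.getD 0 0 + ((k/2 : Nat) : Int))) = true) ↔
          (∀ k, k < values.length → values.getD k 0 = values.getD 0 0 + ((k/2 : Nat) : Int)) := by
        rw [beq_iff_eq]
        constructor
        · intro h k hk
          have := congrArg (fun l => l.getD k (0:Int)) h
          simp only at this
          rw [PySem.List.getD_map_range _ _ _ _ hk] at this
          exact this
        · intro h
          apply List.ext_getElem
          · simp
          · intro k hk1 hk2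
            have hx := h k hk1
            rw [List.getD_eq_getElem values 0 hk1] at hx
            rw [hx, List.getElem_map, List.getElem_range]
      -- assemble
      simp only []
      rw [hpv, hexp, pvIfBool, Bool.eq_iff_iff, Bool.and_eq_true]
      constructor
      · rintro ⟨hp, hc⟩
        refine hB.mpr (fun k hk => ?_)
        exact ((pvCore (fun k => values.getD k 0) m (by omega)).mp
          ⟨hpairs.mp hp, hconsec.mp hc⟩) k (by omega)
      · intro hBt
        have hP : ∀ k, k < 2*m → values.getD k 0 = values.getD 0 0 + ((k/2 : Nat) : Int) :=
          fun k hk => hB.mp hBt k (by omega)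
        have hPC := (pvCore (fun k => values.getD k 0) m (by omega)).mpr hP
        exact ⟨hpairs.mpr hPC.1, hconsec.mpr hPC.2⟩

-- ===== VERDICT (by name: the statement is the Claim_ definition above) =====
theorem is_straight_pairs_spec : Claim_equal_is_straight_pairs := by
  intro values _
  unfold Spec_is_straight_pairs
  exact pvMain values
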